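-- pv_equiv track=rewrite | github.com/shbhmpthk/TalkingCalculator | operandGenerator.py | findOperand
-- ===== SOURCE A (Python) =====
-- def findOperand(mytext,result):
--     i=0;
--     while (i<len(mytext) and not mytext[i].isdigit()):
--         i+=1
--     start=i;
--     while (i<len(mytext) and (mytext[i].isdigit())):
--         i+=1
--     operand1 = mytext[start:i]
--     while (i<len(mytext)and not mytext[i].isdigit() ):
--         i+=1
--     start=i;
--     while (i<len(mytext) and (mytext[i].isdigit())):
--         i+=1
--     operand2 = mytext[start:i]
--     if('result' in mytext):
--         operand2 = result
--     mylist =[operand1,operand2]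
--     return mylist
-- ===== SOURCE B (Python) =====
-- def findOperand(mytext, result):
--     runs = ''.join(c if c.isdigit() else ' ' for c in mytext).split()
--     operand1 = runs[0] if len(runs) > 0 else ''
--     operand2 = result if 'result' in mytext else (runs[1] if len(runs) > 1 else '')
--     return [operand1, operand2]
-- ===== Notes on version B (the rewrite author's own statement) =====
-- stated objective: simpler
-- what changed: Replaces the four sequential index-advancing while loops and manual slicing with one masking pass (non-digits to spaces) followed by str.split(), then picks the first two digit runs by index.
import Mathlib
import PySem

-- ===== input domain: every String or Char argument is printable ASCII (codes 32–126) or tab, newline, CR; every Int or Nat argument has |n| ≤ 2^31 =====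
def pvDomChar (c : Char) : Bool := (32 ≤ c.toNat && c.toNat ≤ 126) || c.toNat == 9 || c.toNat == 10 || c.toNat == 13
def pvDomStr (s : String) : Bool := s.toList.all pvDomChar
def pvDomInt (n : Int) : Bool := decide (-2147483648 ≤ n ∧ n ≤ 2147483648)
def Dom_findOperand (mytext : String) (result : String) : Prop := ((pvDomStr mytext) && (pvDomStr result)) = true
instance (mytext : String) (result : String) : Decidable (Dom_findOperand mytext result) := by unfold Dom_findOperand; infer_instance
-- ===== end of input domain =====

-- B replaces A's four sequential index-advancing scan loops by one masking pass
-- (non-digits -> ' ') followed by str.split(); objective: simpler.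

-- ===== PORT A =====
-- A's while loops 'while i < len(mytext) and <pred>(mytext[i]): i += 1', as index recursion.
def scanWhileA (pred : Char → Bool) (s : List Char) (i : Nat) : Nat :=
  if h : i < s.length then
    if pred s[i] then scanWhileA pred s (i + 1) else i
  else i
termination_by s.length - i

def findOperand (mytext : String) (result : String) : List String :=
  let s := mytext.toList
  let i1 := scanWhileA (fun c => !PySem.Chars.isdigit c) s 0
  let i2 := scanWhileA PySem.Chars.isdigit s i1
  let operand1 := String.ofList (PySem.List.slice s (some (i1 : Int)) (some (i2 : Int)))
  let i3 := scanWhileA (fun c => !PySem.Chars.isdigit c) s i2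
  let i4 := scanWhileA PySem.Chars.isdigit s i3
  let operand2 := String.ofList (PySem.List.slice s (some (i3 : Int)) (some (i4 : Int)))
  let operand2' := if PySem.Str.isIn "result" mytext then result else operand2
  [operand1, operand2']

-- ===== PORT B =====
def findOperand_alt (mytext : String) (result : String) : List String :=
  let masked := mytext.toList.map (fun c => if PySem.Chars.isdigit c then c else ' ')
  let runs := (PySem.Chars.split₀ masked).map String.ofList
  let operand1 := runs.getD 0 ""
  let operand2 := if PySem.Str.isIn "result" mytext then result else runs.getD 1 ""
  [operand1, operand2]

-- ===== PRECONDITION & SPEC =====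
def Spec_findOperand (mytext : String) (result : String) (out : List String) : Prop :=
  out = findOperand_alt mytext result
instance (mytext : String) (result : String) (out : List String) : Decidable (Spec_findOperand mytext result out) := by
  unfold Spec_findOperand; infer_instance

-- ===== CLAIM =====
def Claim_equal_findOperand : Prop :=
  ∀ (mytext : String) (result : String), Dom_findOperand mytext result →
    Spec_findOperand mytext result (findOperand mytext result)

-- ===== LEMMAS AND PROOFS =====
-- the maximal runs of chars NOT satisfying p, separated by chars satisfying p
def runsP (p : Char → Bool) (l : List Char) : List (List Char) :=
  let l' := l.dropWhile p
  if _h : l' = [] then []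
  else l'.takeWhile (fun c => !p c) :: runsP p (l'.dropWhile (fun c => !p c))
termination_by l.length
decreasing_by
  have hlen : (l.dropWhile p).length ≤ l.length := l.length_dropWhile_le p
  rcases hl : l.dropWhile p with _ | ⟨a, t⟩
  · exact absurd hl _h
  · have ha : p a = false := by
      have := List.head_dropWhile_not p (l := l) (by rw [hl]; simp)
      simpa [hl] using this
    rw [hl] at hlen
    simp only [List.dropWhile_cons, ha, Bool.not_false, if_true]
    calc (t.dropWhile fun c => !p c).length ≤ t.length := t.length_dropWhile_le _
      _ < (a :: t).length := by simp
      _ ≤ l.length := hlen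

theorem scanWhileA_eq (pred : Char → Bool) (s : List Char) (i : Nat) (h : i ≤ s.length) :
    scanWhileA pred s i = i + ((s.drop i).takeWhile pred).length := by
  fun_induction scanWhileA pred s i with
  | case1 i h1 h2 ih =>
    rw [ih (by omega)]
    rw [List.drop_eq_getElem_cons h1, List.takeWhile_cons, h2]
    simp; omega
  | case2 i h1 h2 =>
    rw [List.drop_eq_getElem_cons h1, List.takeWhile_cons]
    simp [h2]
  | case3 i h1 =>
    rw [List.drop_eq_nil_iff.mpr (by omega)]
    simp

theorem dropWhile_eq_drop_tw {p : Char → Bool} (l : List Char) :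
    l.dropWhile p = l.drop (l.takeWhile p).length := by
  induction l with
  | nil => simp
  | cons a t ih => by_cases h : p a <;> simp [List.takeWhile, List.dropWhile, h, ih]

theorem take_tw {p : Char → Bool} (l : List Char) :
    l.take (l.takeWhile p).length = l.takeWhile p := by
  induction l with
  | nil => simp
  | cons a t ih => by_cases h : p a <;> simp [List.takeWhile, h, ih]

theorem mask_isspace (c : Char) :
    PySem.Chars.isspace (if PySem.Chars.isdigit c then c else ' ') = !PySem.Chars.isdigit c := by
  by_cases h : PySem.Chars.isdigit c
  · simp only [h, if_true, Bool.not_true]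
    simp only [PySem.Chars.isdigit, Bool.and_eq_true, decide_eq_true_eq, Char.le_def] at h
    have h1 : 48 ≤ c.toNat := by
      have := UInt32.le_iff_toNat_le.mp h.1; simpa using this
    have h2 : c.toNat ≤ 57 := by
      have := UInt32.le_iff_toNat_le.mp h.2; simpa using this
    simp only [PySem.Chars.isspace]
    simp only [Bool.or_eq_false_iff, Bool.and_eq_false_iff, decide_eq_false_iff_not]
    omega
  · simp [h]; decide

theorem go_spec (l : List Char) : ∀ (cur : List Char) (acc : List (List Char)),
    PySem.Chars.split₀.go l cur acc = acc.reverse ++ PySem.Chars.split₀.go l cur [] := by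
  induction l with
  | nil => intro cur acc; by_cases h : cur = [] <;> simp [PySem.Chars.split₀.go, h]
  | cons c t ih =>
    intro cur acc
    by_cases hs : PySem.Chars.isspace c
    · by_cases h : cur = []
      · simp only [PySem.Chars.split₀.go, hs, if_true, h, List.isEmpty_nil]
        exact ih [] acc
      · simp only [PySem.Chars.split₀.go, hs, if_true, List.isEmpty_iff, h]
        rw [ih [] (cur.reverse :: acc), ih [] [cur.reverse]]
        simp
    · simp only [PySem.Chars.split₀.go, hs, Bool.false_eq_true, if_false]
      exact ih (c :: cur) acc

theorem go_word (l : List Char) : ∀ (cur : List Char), cur ≠ [] →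
    PySem.Chars.split₀.go l cur []
      = (cur.reverse ++ l.takeWhile (fun c => !PySem.Chars.isspace c))
        :: PySem.Chars.split₀.go (l.dropWhile (fun c => !PySem.Chars.isspace c)) [] [] := by
  induction l with
  | nil => intro cur hc; simp [PySem.Chars.split₀.go, hc]
  | cons c t ih =>
    intro cur hc
    by_cases hs : PySem.Chars.isspace c
    · simp only [PySem.Chars.split₀.go, hs, if_true, List.isEmpty_iff, hc,
        List.takeWhile_cons, List.dropWhile_cons, Bool.not_true, Bool.false_eq_true]
      rw [go_spec t [] [cur.reverse]]
      simp [PySem.Chars.split₀.go, hs]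
    · simp only [PySem.Chars.split₀.go, hs, Bool.false_eq_true, if_false,
        List.takeWhile_cons, List.dropWhile_cons, Bool.not_false]
      rw [ih (c :: cur) (by simp)]
      simp

theorem go_nil_of_allspace (l : List Char) (h : l.dropWhile PySem.Chars.isspace = []) :
    PySem.Chars.split₀.go l [] [] = [] := by
  induction l with
  | nil => simp [PySem.Chars.split₀.go]
  | cons c t ih =>
    by_cases hs : PySem.Chars.isspace c
    · simp only [List.dropWhile_cons, hs, if_true] at h
      simp only [PySem.Chars.split₀.go, hs, if_true, List.isEmpty_nil]
      exact ih h
    · simp [hs] at h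

theorem go_runs (l : List Char) (h : l.dropWhile PySem.Chars.isspace ≠ []) :
    PySem.Chars.split₀.go l [] []
      = (l.dropWhile PySem.Chars.isspace).takeWhile (fun c => !PySem.Chars.isspace c)
        :: PySem.Chars.split₀.go
            ((l.dropWhile PySem.Chars.isspace).dropWhile (fun c => !PySem.Chars.isspace c)) [] [] := by
  induction l with
  | nil => simp at h
  | cons c t ih =>
    by_cases hs : PySem.Chars.isspace c
    · simp only [List.dropWhile_cons, hs, if_true] at h ⊢
      simp only [PySem.Chars.split₀.go, hs, if_true, List.isEmpty_nil]
      exact ih h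
    · simp only [List.dropWhile_cons, hs, Bool.false_eq_true, if_false]
      simp only [PySem.Chars.split₀.go, hs, Bool.false_eq_true, if_false]
      rw [go_word t [c] (by simp)]
      simp [hs]

theorem split₀_eq_runsP (l : List Char) :
    PySem.Chars.split₀ l = runsP PySem.Chars.isspace l := by
  show PySem.Chars.split₀.go l [] [] = _
  fun_induction runsP PySem.Chars.isspace l with
  | case1 l l' h => exact go_nil_of_allspace l h
  | case2 l l' h ih => rw [go_runs l h, ih]

theorem runsP_mask (l : List Char) :
    runsP PySem.Chars.isspace (l.map (fun c => if PySem.Chars.isdigit c then c else ' '))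
      = runsP (fun c => !PySem.Chars.isdigit c) l := by
  set f : Char → Char := fun c => if PySem.Chars.isdigit c then c else ' ' with hf
  have hsp : (PySem.Chars.isspace ∘ f) = fun c => !PySem.Chars.isdigit c := by
    funext c
    show PySem.Chars.isspace (if PySem.Chars.isdigit c then c else ' ') = _
    exact mask_isspace c
  have hnots : ((fun c => !PySem.Chars.isspace c) ∘ f) = PySem.Chars.isdigit := by
    funext c
    show (!PySem.Chars.isspace (if PySem.Chars.isdigit c then c else ' ')) = _
    rw [mask_isspace c]
    simp
  have hnn : (fun c => !!PySem.Chars.isdigit c) = PySem.Chars.isdigit := by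
    funext c; simp
  fun_induction runsP (fun c => !PySem.Chars.isdigit c) l with
  | case1 l l' h =>
    have h' : l.dropWhile (fun c => !PySem.Chars.isdigit c) = [] := h
    rw [runsP]
    simp only [List.dropWhile_map, hsp, h', List.map_nil, dif_pos]
  | case2 l l' h ih =>
    have h' : l.dropWhile (fun c => !PySem.Chars.isdigit c) ≠ [] := h
    rw [hnn] at ih ⊢
    have hdm : (l.map f).dropWhile PySem.Chars.isspace
        = (l.dropWhile (fun c => !PySem.Chars.isdigit c)).map f := by
      rw [List.dropWhile_map, hsp]
    have hne : (l.dropWhile (fun c => !PySem.Chars.isdigit c)).map f ≠ [] := by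
      intro hc; exact h' (by simpa using hc)
    have htw : ((l.dropWhile (fun c => !PySem.Chars.isdigit c)).map f).takeWhile
          (fun c => !PySem.Chars.isspace c)
        = (l.dropWhile (fun c => !PySem.Chars.isdigit c)).takeWhile PySem.Chars.isdigit := by
      rw [List.takeWhile_map, hnots]
      have hfa : ∀ a ∈ (l.dropWhile (fun c => !PySem.Chars.isdigit c)).takeWhile
          PySem.Chars.isdigit, f a = a := by
        intro a ha
        have := List.mem_takeWhile_imp ha
        simp [hf, this]
      rw [List.map_congr_left hfa]
      simp
    have hdw : ((l.dropWhile (fun c => !PySem.Chars.isdigit c)).map f).dropWhile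
          (fun c => !PySem.Chars.isspace c)
        = ((l.dropWhile (fun c => !PySem.Chars.isdigit c)).dropWhile
            PySem.Chars.isdigit).map f := by
      rw [List.dropWhile_map, hnots]
    rw [runsP]
    simp only [hdm, hne, dif_neg, not_false_iff, htw, hdw]
    rw [ih]

theorem runsP_getD_zero (p : Char → Bool) (l : List Char) :
    (runsP p l).getD 0 [] = (l.dropWhile p).takeWhile (fun c => !p c) := by
  rw [runsP]
  by_cases h : l.dropWhile p = []
  · simp [h]
  · simp [h]

theorem runsP_getD_one (p : Char → Bool) (l : List Char) :
    (runsP p l).getD 1 []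
      = (runsP p ((l.dropWhile p).dropWhile (fun c => !p c))).getD 0 [] := by
  rw [runsP]
  by_cases h : l.dropWhile p = []
  · simp [h, runsP]
  · simp [h]

theorem drop_scan (q : Char → Bool) (s : List Char) (i : Nat) (v : List Char)
    (hv : s.drop i = v) (hle : i ≤ s.length) :
    s.drop (scanWhileA q s i) = v.dropWhile q := by
  have key : ∀ t : Nat, s.drop (i + t) = (s.drop i).drop t := by
    intro t; rw [List.drop_drop]
  rw [scanWhileA_eq q s i hle, hv, key, hv, ← dropWhile_eq_drop_tw]

theorem findOperand_eq_alt (mytext result : String) :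
    findOperand mytext result = findOperand_alt mytext result := by
  have hnn : (fun c => !!PySem.Chars.isdigit c) = PySem.Chars.isdigit := by
    funext c; simp
  simp only [findOperand, findOperand_alt]
  set s := mytext.toList with hs
  set p : Char → Bool := fun c => !PySem.Chars.isdigit c with hp
  -- the index computations of A
  have hi1 : scanWhileA p s 0 = (s.takeWhile p).length := by
    rw [scanWhileA_eq p s 0 (Nat.zero_le _)]; simp
  have hi1le : scanWhileA p s 0 ≤ s.length := by
    rw [hi1]; exact (List.takeWhile_sublist p (l := s)).length_le
  have hd1 : s.drop (scanWhileA p s 0) = s.dropWhile p := by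
    rw [hi1, ← dropWhile_eq_drop_tw]
  have hi2 : scanWhileA PySem.Chars.isdigit s (scanWhileA p s 0)
      = scanWhileA p s 0 + ((s.dropWhile p).takeWhile PySem.Chars.isdigit).length := by
    rw [scanWhileA_eq _ s _ hi1le, hd1]
  have hi2le : scanWhileA PySem.Chars.isdigit s (scanWhileA p s 0) ≤ s.length := by
    rw [hi2]
    have h1 : ((s.dropWhile p).takeWhile PySem.Chars.isdigit).length
        ≤ (s.drop (scanWhileA p s 0)).length := by
      rw [hd1]; exact (List.takeWhile_sublist _ (l := s.dropWhile p)).length_le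
    have h2 := List.length_drop (l := s) (i := scanWhileA p s 0)
    omega
  have hd2 : s.drop (scanWhileA PySem.Chars.isdigit s (scanWhileA p s 0))
      = (s.dropWhile p).dropWhile PySem.Chars.isdigit := by
    exact drop_scan PySem.Chars.isdigit s _ _ hd1 hi1le
  have hslice1 : PySem.List.slice s (some ((scanWhileA p s 0 : Nat) : Int))
        (some ((scanWhileA PySem.Chars.isdigit s (scanWhileA p s 0) : Nat) : Int))
      = (s.dropWhile p).takeWhile PySem.Chars.isdigit := by
    rw [PySem.List.slice_natCast, hi2, Nat.add_sub_cancel_left, hd1, take_tw]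
  -- second operand
  set i2 := scanWhileA PySem.Chars.isdigit s (scanWhileA p s 0) with hi2d
  set u := (s.dropWhile p).dropWhile PySem.Chars.isdigit with hu
  have hi3 : scanWhileA p s i2 = i2 + (u.takeWhile p).length := by
    rw [scanWhileA_eq p s i2 hi2le, hd2]
  have hi3le : scanWhileA p s i2 ≤ s.length := by
    rw [hi3]
    have h1 : (u.takeWhile p).length ≤ (s.drop i2).length := by
      rw [hd2]; exact (List.takeWhile_sublist p (l := u)).length_le
    have h2 := List.length_drop (l := s) (i := i2)
    omega
  have hd3 : s.drop (scanWhileA p s i2) = u.dropWhile p := by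
    exact drop_scan p s i2 u hd2 hi2le
  have hi4 : scanWhileA PySem.Chars.isdigit s (scanWhileA p s i2)
      = scanWhileA p s i2 + ((u.dropWhile p).takeWhile PySem.Chars.isdigit).length := by
    rw [scanWhileA_eq _ s _ hi3le, hd3]
  have hslice2 : PySem.List.slice s (some ((scanWhileA p s i2 : Nat) : Int))
        (some ((scanWhileA PySem.Chars.isdigit s (scanWhileA p s i2) : Nat) : Int))
      = (u.dropWhile p).takeWhile PySem.Chars.isdigit := by
    rw [PySem.List.slice_natCast, hi4, Nat.add_sub_cancel_left, hd3, take_tw]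
  -- B's runs
  have hruns : PySem.Chars.split₀ (s.map (fun c => if PySem.Chars.isdigit c then c else ' '))
      = runsP p s := by
    rw [split₀_eq_runsP, runsP_mask]
  have hop1 : (s.dropWhile p).takeWhile PySem.Chars.isdigit = (runsP p s).getD 0 [] := by
    rw [runsP_getD_zero]
    show _ = (s.dropWhile p).takeWhile (fun c => !!PySem.Chars.isdigit c)
    rw [hnn]
  have hop2 : (u.dropWhile p).takeWhile PySem.Chars.isdigit = (runsP p s).getD 1 [] := by
    rw [runsP_getD_one, runsP_getD_zero]
    show _ = ((((s.dropWhile p).dropWhile (fun c => !!PySem.Chars.isdigit c)).dropWhile p).takeWhile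
      (fun c => !!PySem.Chars.isdigit c))
    rw [hnn, ← hu]
  have hgetD : ∀ n : Nat, ((runsP p s).map String.ofList).getD n ""
      = String.ofList ((runsP p s).getD n []) := by
    intro n
    exact List.getD_map (runsP p s) [] String.ofList
  rw [hslice1, hslice2, hruns, hgetD 0, hgetD 1, hop1, hop2]

-- ===== VERDICT =====
theorem findOperand_spec : Claim_equal_findOperand := by
  intro mytext result _hdom
  show findOperand mytext result = findOperand_alt mytext result
  exact findOperand_eq_alt mytext result
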